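-- pv_equiv track=rewrite | github.com/jmk5040/Code_archive_211020 | ks4_catalog.py | imlistsort_ks4
-- ===== SOURCE A (Python) =====
-- def imlistsort_ks4(imlist):
--         newlist     = []
--         ks4ftr  = ['B', 'V', 'R', 'I']
--         for ftr in ks4ftr:
--             for i in range(len(imlist)):
--                 if ftr in imlist[i]:
--                     newlist.append(imlist[i])
--         return newlist
-- ===== SOURCE B (Python) =====
-- def imlistsort_ks4(imlist):
--     # one pass over imlist into four filter buckets, concatenated in B,V,R,I priority order
--     bb, bv, br, bi = [], [], [], []
--     for im in imlist:
--         if 'B' in im: bb.append(im)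
--         if 'V' in im: bv.append(im)
--         if 'R' in im: br.append(im)
--         if 'I' in im: bi.append(im)
--     return bb + bv + br + bi
-- ===== Notes on version B (the rewrite author's own statement) =====
-- stated objective: alternative
-- what changed: Replaces four full scans of imlist (one per filter letter) with a single pass that appends each image to per-filter buckets, concatenated in B,V,R,I order.
import Mathlib
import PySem

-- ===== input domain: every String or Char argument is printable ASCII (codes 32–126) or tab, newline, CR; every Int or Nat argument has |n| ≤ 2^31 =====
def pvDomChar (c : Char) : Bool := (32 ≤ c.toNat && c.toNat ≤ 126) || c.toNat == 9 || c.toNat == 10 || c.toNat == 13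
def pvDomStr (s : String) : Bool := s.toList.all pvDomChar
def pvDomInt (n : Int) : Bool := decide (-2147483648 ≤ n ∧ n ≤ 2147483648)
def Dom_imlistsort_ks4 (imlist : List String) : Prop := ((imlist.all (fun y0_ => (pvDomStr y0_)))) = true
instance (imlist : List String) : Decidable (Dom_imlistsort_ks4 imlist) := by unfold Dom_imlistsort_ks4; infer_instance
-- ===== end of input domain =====

-- B replaces A's four full scans (one per filter letter) with a single bucketing pass; concatenation in B,V,R,I order preserves the exact output.

-- ===== PORT A =====
-- for ftr in ['B','V','R','I']: for i in range(len(imlist)): if ftr in imlist[i]: newlist.append(imlist[i])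
-- (pyGetD with default "" is exact: i ranges over 0..len-1 so the index is always in range)
def imlistsort_ks4 (imlist : List String) : List String :=
  ["B", "V", "R", "I"].foldl (fun newlist ftr =>
    (PySem.List.pyRange 0 (imlist.length : Int) 1).foldl (fun nl i =>
      if PySem.Str.isIn ftr (PySem.List.pyGetD imlist i "") then nl ++ [PySem.List.pyGetD imlist i ""] else nl)
      newlist) []

-- ===== PORT B =====
-- single pass: four buckets (bb, bv, br, bi), then bb + bv + br + bi
def imlistsort_ks4_alt (imlist : List String) : List String :=
  let st := imlist.foldl (fun (acc : List String × List String × List String × List String) im =>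
    let (bb, bv, br, bi) := acc
    let bb := if PySem.Str.isIn "B" im then bb ++ [im] else bb
    let bv := if PySem.Str.isIn "V" im then bv ++ [im] else bv
    let br := if PySem.Str.isIn "R" im then br ++ [im] else br
    let bi := if PySem.Str.isIn "I" im then bi ++ [im] else bi
    (bb, bv, br, bi)) ([], [], [], [])
  st.1 ++ st.2.1 ++ st.2.2.1 ++ st.2.2.2

-- ===== PRECONDITION & SPEC =====
def Spec_imlistsort_ks4 (imlist : List String) (out : List String) : Prop := out = imlistsort_ks4_alt imlist
instance (imlist : List String) (out : List String) : Decidable (Spec_imlistsort_ks4 imlist out) := by unfold Spec_imlistsort_ks4; infer_instance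

-- ===== CLAIM (what is proved, stated in full; the proofs are below) =====
def Claim_equal_imlistsort_ks4 : Prop := ∀ (imlist : List String), Dom_imlistsort_ks4 imlist → Spec_imlistsort_ks4 imlist (imlistsort_ks4 imlist)

-- ===== LEMMAS AND PROOFS =====

-- moving a conditional append across a fixed suffix
theorem append_if_comm {α : Type} (p : Bool) (l f : List α) (x : α) :
    (if p = true then l ++ [x] else l) ++ f = l ++ (if p = true then x :: f else f) := by
  cases p <;> simp

-- the bucketing fold computes per-filter filters appended to the initial buckets
theorem alt_fold_eq (xs : List String) (bb bv br bi : List String) :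
    xs.foldl (fun (acc : List String × List String × List String × List String) im =>
      let (b1, b2, b3, b4) := acc
      let b1 := if PySem.Str.isIn "B" im then b1 ++ [im] else b1
      let b2 := if PySem.Str.isIn "V" im then b2 ++ [im] else b2
      let b3 := if PySem.Str.isIn "R" im then b3 ++ [im] else b3
      let b4 := if PySem.Str.isIn "I" im then b4 ++ [im] else b4
      (b1, b2, b3, b4)) (bb, bv, br, bi)
    = (bb ++ xs.filter (fun im => PySem.Str.isIn "B" im),
       bv ++ xs.filter (fun im => PySem.Str.isIn "V" im),
       br ++ xs.filter (fun im => PySem.Str.isIn "R" im),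
       bi ++ xs.filter (fun im => PySem.Str.isIn "I" im)) := by
  induction xs generalizing bb bv br bi with
  | nil => simp
  | cons x xs ih =>
    simp only [List.foldl_cons, List.filter_cons]
    rw [ih]
    refine Prod.ext ?_ (Prod.ext ?_ (Prod.ext ?_ ?_)) <;>
      exact append_if_comm _ _ _ _

-- A's inner index loop over one filter equals the corresponding filter
theorem a_inner_eq (imlist : List String) (ftr : String) (nl : List String) :
    (PySem.List.pyRange 0 (imlist.length : Int) 1).foldl (fun nl i =>
      if PySem.Str.isIn ftr (PySem.List.pyGetD imlist i "") then nl ++ [PySem.List.pyGetD imlist i ""] else nl) nl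
    = nl ++ imlist.filter (fun im => PySem.Str.isIn ftr im) := by
  rw [PySem.List.foldl_pyRange_zero_pyGetD'
    (f := fun (acc : List String) (s : String) => if PySem.Str.isIn ftr s then acc ++ [s] else acc)]
  exact PySem.List.foldl_append_if_eq_filter _ _ _

-- ===== VERDICT (by name: the statement is the Claim_ definition above) =====
theorem imlistsort_ks4_spec : Claim_equal_imlistsort_ks4 := by
  intro imlist _
  unfold Spec_imlistsort_ks4 imlistsort_ks4 imlistsort_ks4_alt
  simp only [List.foldl_cons, List.foldl_nil, a_inner_eq, alt_fold_eq]
  simp
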